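-- pv_equiv track=rewrite | github.com/makarandthengdi/dbping | dbping.py | format_input_string
-- ===== SOURCE A (Python) =====
-- def format_input_string(text, length, skip_masking_for_initial_chars):
--     if length < 0:
--         raise ValueError("Length cannot be negative.")
--     if skip_masking_for_initial_chars < 0:
--         raise ValueError("Skip masking for initial chars cannot be negative.")
--
--     masked_text = ""
--     for i, char in enumerate(text):
--         if i < skip_masking_for_initial_chars:
--             masked_text += char
--         else:
--             if i - skip_masking_for_initial_chars < length:
--                 masked_text += "*"
--
--     return masked_text
-- ===== SOURCE B (Python) =====
-- def format_input_string(text, length, skip_masking_for_initial_chars):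
--     if length < 0:
--         raise ValueError("Length cannot be negative.")
--     if skip_masking_for_initial_chars < 0:
--         raise ValueError("Skip masking for initial chars cannot be negative.")
--     skip = skip_masking_for_initial_chars
--     return text[:skip] + "*" * max(0, min(length, len(text) - skip))
-- ===== Notes on version B (the rewrite author's own statement) =====
-- stated objective: simpler
-- what changed: Replaces the per-character enumerate loop with a closed form: slice the kept prefix and append a computed-count run of '*'s (C-level slice/repeat instead of a Python-level loop).
import Mathlib
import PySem

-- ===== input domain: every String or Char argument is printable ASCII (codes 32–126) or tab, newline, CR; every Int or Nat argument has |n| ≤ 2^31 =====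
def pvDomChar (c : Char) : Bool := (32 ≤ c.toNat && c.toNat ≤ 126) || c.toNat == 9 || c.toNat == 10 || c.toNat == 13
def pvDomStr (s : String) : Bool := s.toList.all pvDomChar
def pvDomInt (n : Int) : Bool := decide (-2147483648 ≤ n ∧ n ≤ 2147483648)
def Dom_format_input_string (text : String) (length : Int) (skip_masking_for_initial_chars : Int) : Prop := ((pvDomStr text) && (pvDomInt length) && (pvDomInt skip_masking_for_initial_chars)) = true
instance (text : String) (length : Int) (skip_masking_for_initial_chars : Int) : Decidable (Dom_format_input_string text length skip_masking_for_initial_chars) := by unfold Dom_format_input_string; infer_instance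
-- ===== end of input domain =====

-- B replaces A's per-character enumerate loop by the closed form prefix-slice ++ '*'-run (simpler).
-- Pre_ excludes negative length or skip, on which A raises ValueError (B raises too).


-- ===== PORT A =====
-- the 'for i, char in enumerate(text)' loop, carrying the index i
def fisLoopA : List Char → Int → Int → Int → List Char
  | [], _, _, _ => []
  | c :: cs, i, skip, length =>
    if i < skip then c :: fisLoopA cs (i + 1) skip length
    else if i - skip < length then '*' :: fisLoopA cs (i + 1) skip length
    else fisLoopA cs (i + 1) skip length

def format_input_string (text : String) (length : Int) (skip_masking_for_initial_chars : Int) : String :=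
  String.ofList (fisLoopA text.toList 0 skip_masking_for_initial_chars length)

-- ===== PORT B =====
-- text[:skip] + "*" * max(0, min(length, len(text) - skip))
def format_input_string_alt (text : String) (length : Int) (skip_masking_for_initial_chars : Int) : String :=
  String.ofList (PySem.List.slice text.toList none (some skip_masking_for_initial_chars) ++
    List.replicate (max 0 (min length ((text.toList.length : Int) - skip_masking_for_initial_chars))).toNat '*')

-- ===== PRECONDITION & SPEC =====
-- excludes exactly the inputs where A raises ValueError (negative length or skip)
def Pre_format_input_string (text : String) (length : Int) (skip_masking_for_initial_chars : Int) : Prop :=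
  0 ≤ length ∧ 0 ≤ skip_masking_for_initial_chars
instance (text : String) (length : Int) (skip_masking_for_initial_chars : Int) : Decidable (Pre_format_input_string text length skip_masking_for_initial_chars) := by unfold Pre_format_input_string; infer_instance

def pvWitness_format_input_string : String × Int × Int := ("hello", 3, 1)

def Spec_format_input_string (text : String) (length : Int) (skip_masking_for_initial_chars : Int) (out : String) : Prop := out = format_input_string_alt text length skip_masking_for_initial_chars
instance (text : String) (length : Int) (skip_masking_for_initial_chars : Int) (out : String) : Decidable (Spec_format_input_string text length skip_masking_for_initial_chars out) := by unfold Spec_format_input_string; infer_instance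

-- ===== CLAIM (what is proved, stated in full; the proofs are below) =====
def Claim_equal_format_input_string : Prop := ∀ (text : String) (length : Int) (skip_masking_for_initial_chars : Int), Dom_format_input_string text length skip_masking_for_initial_chars → Pre_format_input_string text length skip_masking_for_initial_chars → Spec_format_input_string text length skip_masking_for_initial_chars (format_input_string text length skip_masking_for_initial_chars)

-- ===== LEMMAS AND PROOFS =====

-- closed form of the loop at an arbitrary index i
theorem fisLoopA_closed (cs : List Char) : ∀ (i skip length : Int), 0 ≤ i → 0 ≤ skip → 0 ≤ length →
    fisLoopA cs i skip length =
      cs.take (skip - i).toNat ++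
        List.replicate (min (cs.length - (skip - i).toNat) (length - max 0 (i - skip)).toNat) '*' := by
  induction cs with
  | nil => intros; simp [fisLoopA]
  | cons c cs ih =>
    intro i skip length hi hs hl
    by_cases h1 : i < skip
    · have hm : (skip - i).toNat = (skip - (i + 1)).toNat + 1 := by omega
      have hb : (length - max 0 ((i + 1) - skip)).toNat = (length - max 0 (i - skip)).toNat := by omega
      simp only [fisLoopA, if_pos h1, ih (i + 1) skip length (by omega) hs hl, hm, hb,
        List.take_succ_cons, List.length_cons]
      have : cs.length + 1 - ((skip - (i + 1)).toNat + 1) = cs.length - (skip - (i + 1)).toNat := by omega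
      rw [this]
      simp
    · have hm : (skip - i).toNat = 0 := by omega
      have hm1 : (skip - (i + 1)).toNat = 0 := by omega
      by_cases h2 : i - skip < length
      · have hb : min ((c :: cs).length - 0) (length - max 0 (i - skip)).toNat =
            min (cs.length - 0) (length - max 0 ((i + 1) - skip)).toNat + 1 := by
          simp only [List.length_cons]; omega
        simp only [fisLoopA, if_neg h1, if_pos h2, ih (i + 1) skip length (by omega) hs hl, hm, hm1, hb]
        simp [List.replicate_succ]
      · have hb : (length - max 0 (i - skip)).toNat = 0 := by omega
        have hb1 : (length - max 0 ((i + 1) - skip)).toNat = 0 := by omega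
        simp only [fisLoopA, if_neg h1, if_neg h2, ih (i + 1) skip length (by omega) hs hl, hm, hm1, hb, hb1]
        simp

-- ===== VERDICT (by name: the statement is the Claim_ definition above) =====
theorem format_input_string_spec : Claim_equal_format_input_string := by
  intro text length skip _ hpre
  obtain ⟨hl, hs⟩ := hpre
  unfold Spec_format_input_string format_input_string format_input_string_alt
  rw [fisLoopA_closed text.toList 0 skip length le_rfl hs hl, PySem.List.slice_to _ hs]
  congr 2
  · congr 1; omega
  · congr 1; omega
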